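-- pv_equiv track=rewrite | github.com/eliottcassidy2000/math | 04-computation/forbidden_residue_mechanism.py | count_directed_3cycles
-- ===== SOURCE A (Python) =====
-- def count_directed_3cycles(adj, n):
--     count = 0
--     for i in range(n):
--         for j in range(i+1, n):
--             for k in range(j+1, n):
--                 if adj[i][j] and adj[j][k] and adj[k][i]:
--                     count += 1
--                 if adj[i][k] and adj[k][j] and adj[j][i]:
--                     count += 1
--     return count
-- ===== SOURCE B (Python) =====
-- def count_directed_3cycles(adj, n):
--     # trace(B^3)/3 where B is the booleanized adjacency matrix with zero diagonal
--     b = [[1 if (adj[i][j] and i != j) else 0 for j in range(n)] for i in range(n)]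
--     m = [[sum(b[i][l] * b[l][j] for l in range(n)) for j in range(n)] for i in range(n)]
--     t = sum(m[i][j] * b[j][i] for i in range(n) for j in range(n))
--     return t // 3
-- ===== Notes on version B (the rewrite author's own statement) =====
-- stated objective: alternative
-- what changed: Replaces A's triangular triple loop over ordered triples i<j<k (two orientation tests each) by linear algebra: build the zero-diagonal 0/1 adjacency matrix B, square it, and return trace(B^3)//3, which counts every directed 3-cycle once per starting vertex.
-- outside the precondition, e.g. on count_directed_3cycles([], 1): A returns 0, B raises IndexError
import Mathlib
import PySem

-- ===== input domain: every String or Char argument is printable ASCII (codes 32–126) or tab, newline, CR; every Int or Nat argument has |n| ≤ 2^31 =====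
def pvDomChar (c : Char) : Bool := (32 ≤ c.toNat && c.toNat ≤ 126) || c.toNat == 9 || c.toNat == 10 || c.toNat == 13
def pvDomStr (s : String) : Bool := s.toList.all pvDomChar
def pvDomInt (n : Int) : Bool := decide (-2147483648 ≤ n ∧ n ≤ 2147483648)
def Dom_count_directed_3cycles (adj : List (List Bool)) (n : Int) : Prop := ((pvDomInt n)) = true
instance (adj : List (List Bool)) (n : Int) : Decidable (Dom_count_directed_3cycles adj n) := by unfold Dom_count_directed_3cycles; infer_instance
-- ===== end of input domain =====

-- B replaces A's triangular triple loop by trace(B^3)//3 on the zero-diagonal 0/1 adjacency matrix (alternative algorithm, similar cost).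


-- ===== PORT A =====
def count_directed_3cycles (adj : List (List Bool)) (n : Int) : Int :=
  (PySem.List.pyRange 0 n 1).foldl (fun count i =>
    (PySem.List.pyRange (i+1) n 1).foldl (fun count j =>
      (PySem.List.pyRange (j+1) n 1).foldl (fun count k =>
        let count := if PySem.List.pyGetD (PySem.List.pyGetD adj i []) j false &&
                        PySem.List.pyGetD (PySem.List.pyGetD adj j []) k false &&
                        PySem.List.pyGetD (PySem.List.pyGetD adj k []) i false
                     then count + 1 else count
        if PySem.List.pyGetD (PySem.List.pyGetD adj i []) k false &&
           PySem.List.pyGetD (PySem.List.pyGetD adj k []) j false &&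
           PySem.List.pyGetD (PySem.List.pyGetD adj j []) i false
        then count + 1 else count) count) count) 0

-- ===== PORT B =====
def count_directed_3cycles_alt (adj : List (List Bool)) (n : Int) : Int :=
  let b := (PySem.List.pyRange 0 n 1).map (fun i =>
    (PySem.List.pyRange 0 n 1).map (fun j =>
      if PySem.List.pyGetD (PySem.List.pyGetD adj i []) j false && (i != j) then (1 : Int) else 0))
  let m := (PySem.List.pyRange 0 n 1).map (fun i =>
    (PySem.List.pyRange 0 n 1).map (fun j =>
      ((PySem.List.pyRange 0 n 1).map (fun l =>
        PySem.List.pyGetD (PySem.List.pyGetD b i []) l 0 *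
        PySem.List.pyGetD (PySem.List.pyGetD b l []) j 0)).sum))
  let t := ((PySem.List.pyRange 0 n 1).map (fun i =>
    ((PySem.List.pyRange 0 n 1).map (fun j =>
      PySem.List.pyGetD (PySem.List.pyGetD m i []) j 0 *
      PySem.List.pyGetD (PySem.List.pyGetD b j []) i 0)).sum)).sum
  PySem.Int.floordiv t 3

-- ===== PRECONDITION & SPEC =====
-- Pre_ excludes inputs whose adjacency matrix does not supply a full n×n block (ragged or too
-- small): there Python B (a full matrix scan) raises IndexError, while A's triangular loops and
-- short-circuit conjunctions sometimes still return before hitting a missing entry.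
def Pre_count_directed_3cycles (adj : List (List Bool)) (n : Int) : Prop :=
  0 < n → (n.toNat ≤ adj.length ∧ ∀ row ∈ adj.take n.toNat, n.toNat ≤ row.length)
instance (adj : List (List Bool)) (n : Int) : Decidable (Pre_count_directed_3cycles adj n) := by
  unfold Pre_count_directed_3cycles; infer_instance

def pvWitness_count_directed_3cycles : List (List Bool) × Int :=
  ([[false, true, false], [false, false, true], [true, false, false]], 3)

def Spec_count_directed_3cycles (adj : List (List Bool)) (n : Int) (out : Int) : Prop := out = count_directed_3cycles_alt adj n
instance (adj : List (List Bool)) (n : Int) (out : Int) : Decidable (Spec_count_directed_3cycles adj n out) := by unfold Spec_count_directed_3cycles; infer_instance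

-- ===== CLAIM (what is proved, stated in full; the proofs are below) =====
def Claim_equal_count_directed_3cycles : Prop := ∀ (adj : List (List Bool)) (n : Int), Dom_count_directed_3cycles adj n → Pre_count_directed_3cycles adj n → Spec_count_directed_3cycles adj n (count_directed_3cycles adj n)

-- ===== LEMMAS AND PROOFS =====

theorem pv_square (f : ℕ → ℕ → ℤ) (hd : ∀ x, f x x = 0) (N : ℕ) :
    ∑ x ∈ Finset.range N, ∑ y ∈ Finset.range N, f x y
      = ∑ x ∈ Finset.range N, ∑ y ∈ Finset.range N, (if x < y then f x y + f y x else 0) := by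
  have tri : ∀ x y : ℕ, f x y = (if x < y then f x y else 0) + (if y < x then f x y else 0) := by
    intro x y
    rcases lt_trichotomy x y with h | h | h
    · simp [h, not_lt.mpr (le_of_lt h)]
    · subst h; simp [hd]
    · simp [h, not_lt.mpr (le_of_lt h)]
  calc ∑ x ∈ Finset.range N, ∑ y ∈ Finset.range N, f x y
      = ∑ x ∈ Finset.range N, ∑ y ∈ Finset.range N,
          ((if x < y then f x y else 0) + (if y < x then f x y else 0)) := by
        exact Finset.sum_congr rfl fun x _ => Finset.sum_congr rfl fun y _ => tri x y
    _ = (∑ x ∈ Finset.range N, ∑ y ∈ Finset.range N, (if x < y then f x y else 0))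
        + ∑ x ∈ Finset.range N, ∑ y ∈ Finset.range N, (if y < x then f x y else 0) := by
        simp [Finset.sum_add_distrib]
    _ = (∑ x ∈ Finset.range N, ∑ y ∈ Finset.range N, (if x < y then f x y else 0))
        + ∑ x ∈ Finset.range N, ∑ y ∈ Finset.range N, (if x < y then f y x else 0) := by
        congr 1
        rw [Finset.sum_comm]
    _ = ∑ x ∈ Finset.range N, ∑ y ∈ Finset.range N, (if x < y then f x y + f y x else 0) := by
        rw [← Finset.sum_add_distrib]
        refine Finset.sum_congr rfl fun x _ => ?_
        rw [← Finset.sum_add_distrib]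
        refine Finset.sum_congr rfl fun y _ => ?_
        split_ifs <;> simp

theorem pv_key (g : ℕ → ℕ → ℤ) (hd : ∀ x, g x x = 0) (N : ℕ) :
    (∑ a ∈ Finset.range N, ∑ b ∈ Finset.range N, ∑ c ∈ Finset.range N, g a b * g b c * g c a)
      = 3 * ∑ a ∈ Finset.range N, ∑ b ∈ Finset.range N, ∑ c ∈ Finset.range N,
          (if a < b ∧ b < c then g a b * g b c * g c a + g a c * g c b * g b a else 0) := by
  induction N with
  | zero => simp
  | succ N ih =>
    have hP := pv_square (fun x y => g N x * g x y * g y N) (by intro x; simp [hd]) N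
    simp only [Finset.sum_range_succ, Finset.sum_add_distrib, hd, mul_zero, zero_mul,
      add_zero, Finset.sum_const_zero]
    rw [ih]
    have hB2 : (∑ x ∈ Finset.range N, ∑ c ∈ Finset.range N, g x N * g N c * g c x)
        = ∑ x ∈ Finset.range N, ∑ y ∈ Finset.range N, g N x * g x y * g y N := by
      have : (∑ x ∈ Finset.range N, ∑ c ∈ Finset.range N, g x N * g N c * g c x)
          = ∑ x ∈ Finset.range N, ∑ c ∈ Finset.range N, g N c * g c x * g x N :=
        Finset.sum_congr rfl fun x _ => Finset.sum_congr rfl fun c _ => by ring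
      rw [this, Finset.sum_comm]
    have hB3 : (∑ x ∈ Finset.range N, ∑ y ∈ Finset.range N, g x y * g y N * g N x)
        = ∑ x ∈ Finset.range N, ∑ y ∈ Finset.range N, g N x * g x y * g y N :=
      Finset.sum_congr rfl fun x _ => Finset.sum_congr rfl fun y _ => by ring
    have hR1 : (∑ x ∈ Finset.range N, ∑ c ∈ Finset.range N,
        if N < x ∧ x < c then g N x * g x c * g c N + g N c * g c x * g x N else 0) = 0 :=
      Finset.sum_eq_zero fun x hx => Finset.sum_eq_zero fun c _ =>
        if_neg (by simp at hx; omega)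
    have hR2 : (∑ x ∈ Finset.range N, ∑ c ∈ Finset.range N,
        if x < N ∧ N < c then g x N * g N c * g c x + g x c * g c N * g N x else 0) = 0 :=
      Finset.sum_eq_zero fun x _ => Finset.sum_eq_zero fun c hc =>
        if_neg (by simp at hc; omega)
    have hMain : (∑ x ∈ Finset.range N, ∑ y ∈ Finset.range N,
        if x < y ∧ y < N then g x y * g y N * g N x + g x N * g N y * g y x else 0)
        = ∑ x ∈ Finset.range N, ∑ y ∈ Finset.range N, g N x * g x y * g y N := by
      rw [hP]
      refine Finset.sum_congr rfl fun x _ => Finset.sum_congr rfl fun y hy => ?_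
      simp only [Finset.mem_range] at hy
      by_cases h : x < y
      · rw [if_pos ⟨h, hy⟩, if_pos h]; ring
      · rw [if_neg (by omega), if_neg h]
    rw [hB2, hB3, hR1, hR2, hMain]
    simp only [ite_self, Finset.sum_const_zero, add_zero]
    ring

def pvE (adj : List (List Bool)) (x y : ℕ) : Bool :=
  PySem.List.pyGetD (PySem.List.pyGetD adj (x : Int) []) (y : Int) false

def pvG (adj : List (List Bool)) (x y : ℕ) : ℤ :=
  if pvE adj x y && (x != y) then 1 else 0

theorem pv_lsum (n : ℕ) (f : ℕ → ℤ) :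
    ((List.range n).map f).sum = ∑ i ∈ Finset.range n, f i := by
  induction n with
  | zero => simp
  | succ n ih => simp [List.range_succ, Finset.sum_range_succ, ih]

theorem pv_alt_eval (adj : List (List Bool)) (N : ℕ) :
    count_directed_3cycles_alt adj (N : Int)
      = PySem.Int.floordiv (∑ a ∈ Finset.range N, ∑ b ∈ Finset.range N, ∑ c ∈ Finset.range N,
          pvG adj a b * pvG adj b c * pvG adj c a) 3 := by
  have hrange : PySem.List.pyRange 0 (N:ℤ) 1 = (List.range N).map (Nat.cast : ℕ → ℤ) := by
    simp [PySem.List.pyRange_one]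
  unfold count_directed_3cycles_alt
  rw [hrange]
  simp only [List.map_map, Function.comp_def, pv_lsum]
  refine congrArg (fun z => PySem.Int.floordiv z 3) ?_
  have step : (∑ x ∈ Finset.range N, ∑ y ∈ Finset.range N,
      (∑ l ∈ Finset.range N, pvG adj x l * pvG adj l y) * pvG adj y x)
      = ∑ a ∈ Finset.range N, ∑ b ∈ Finset.range N, ∑ c ∈ Finset.range N,
          pvG adj a b * pvG adj b c * pvG adj c a := by
    have h1 : ∀ x ∈ Finset.range N, ∀ y ∈ Finset.range N,
        ((∑ l ∈ Finset.range N, pvG adj x l * pvG adj l y) * pvG adj y x)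
          = ∑ l ∈ Finset.range N, pvG adj x l * pvG adj l y * pvG adj y x := by
      intro x _ y _; rw [Finset.sum_mul]
    rw [Finset.sum_congr rfl (fun x hx => Finset.sum_congr rfl (fun y hy => h1 x hx y hy))]
    refine Finset.sum_congr rfl fun a _ => ?_
    exact Finset.sum_comm
  rw [← step]
  refine Finset.sum_congr rfl fun x hx => Finset.sum_congr rfl fun y hy => ?_
  simp only [Finset.mem_range] at hx hy
  simp only [hx, hy, List.getD_eq_getElem?_getD, List.getElem?_map, List.getElem?_range,
    PySem.List.pyGetD_natCast, Option.map_some, Option.getD_some]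
  congr 1
  · refine Finset.sum_congr rfl fun l hl => ?_
    simp only [Finset.mem_range] at hl
    simp [hl, hy, pvG, pvE, bne]
  · simp [pvG, pvE, bne]

def pvEI (adj : List (List Bool)) (x y : ℤ) : Bool :=
  PySem.List.pyGetD (PySem.List.pyGetD adj x []) y false

theorem pv_a_sum (adj : List (List Bool)) (n : Int) :
    count_directed_3cycles adj n =
      ((PySem.List.pyRange 0 n 1).map (fun i =>
        ((PySem.List.pyRange (i+1) n 1).map (fun j =>
          ((PySem.List.pyRange (j+1) n 1).map (fun k =>
            (if pvEI adj i j && pvEI adj j k && pvEI adj k i then (1:ℤ) else 0) +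
            (if pvEI adj i k && pvEI adj k j && pvEI adj j i then (1:ℤ) else 0))).sum)).sum)).sum := by
  unfold count_directed_3cycles
  have h1 : ∀ (i j acc : ℤ),
      ((PySem.List.pyRange (j+1) n 1).foldl (fun count k =>
        let count := if PySem.List.pyGetD (PySem.List.pyGetD adj i []) j false &&
                        PySem.List.pyGetD (PySem.List.pyGetD adj j []) k false &&
                        PySem.List.pyGetD (PySem.List.pyGetD adj k []) i false
                     then count + 1 else count
        if PySem.List.pyGetD (PySem.List.pyGetD adj i []) k false &&
           PySem.List.pyGetD (PySem.List.pyGetD adj k []) j false &&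
           PySem.List.pyGetD (PySem.List.pyGetD adj j []) i false
        then count + 1 else count) acc)
      = acc + ((PySem.List.pyRange (j+1) n 1).map (fun k =>
            (if pvEI adj i j && pvEI adj j k && pvEI adj k i then (1:ℤ) else 0) +
            (if pvEI adj i k && pvEI adj k j && pvEI adj j i then (1:ℤ) else 0))).sum := by
    intro i j acc
    rw [show (fun (count k : ℤ) =>
        let count := if PySem.List.pyGetD (PySem.List.pyGetD adj i []) j false &&
                        PySem.List.pyGetD (PySem.List.pyGetD adj j []) k false &&
                        PySem.List.pyGetD (PySem.List.pyGetD adj k []) i false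
                     then count + 1 else count
        if PySem.List.pyGetD (PySem.List.pyGetD adj i []) k false &&
           PySem.List.pyGetD (PySem.List.pyGetD adj k []) j false &&
           PySem.List.pyGetD (PySem.List.pyGetD adj j []) i false
        then count + 1 else count)
      = fun (count k : ℤ) => count +
            ((if pvEI adj i j && pvEI adj j k && pvEI adj k i then (1:ℤ) else 0) +
            (if pvEI adj i k && pvEI adj k j && pvEI adj j i then (1:ℤ) else 0)) from by
        funext count k
        simp only [pvEI]
        split_ifs <;> ring]
    rw [PySem.List.foldl_add]
  have h2 : ∀ (i acc : ℤ),
      ((PySem.List.pyRange (i+1) n 1).foldl (fun count j =>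
        (PySem.List.pyRange (j+1) n 1).foldl (fun count k =>
          let count := if PySem.List.pyGetD (PySem.List.pyGetD adj i []) j false &&
                          PySem.List.pyGetD (PySem.List.pyGetD adj j []) k false &&
                          PySem.List.pyGetD (PySem.List.pyGetD adj k []) i false
                       then count + 1 else count
          if PySem.List.pyGetD (PySem.List.pyGetD adj i []) k false &&
             PySem.List.pyGetD (PySem.List.pyGetD adj k []) j false &&
             PySem.List.pyGetD (PySem.List.pyGetD adj j []) i false
          then count + 1 else count) count) acc)
      = acc + ((PySem.List.pyRange (i+1) n 1).map (fun j =>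
          ((PySem.List.pyRange (j+1) n 1).map (fun k =>
            (if pvEI adj i j && pvEI adj j k && pvEI adj k i then (1:ℤ) else 0) +
            (if pvEI adj i k && pvEI adj k j && pvEI adj j i then (1:ℤ) else 0))).sum)).sum := by
    intro i acc
    rw [show (fun (count j : ℤ) =>
        (PySem.List.pyRange (j+1) n 1).foldl (fun count k =>
          let count := if PySem.List.pyGetD (PySem.List.pyGetD adj i []) j false &&
                          PySem.List.pyGetD (PySem.List.pyGetD adj j []) k false &&
                          PySem.List.pyGetD (PySem.List.pyGetD adj k []) i false
                       then count + 1 else count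
          if PySem.List.pyGetD (PySem.List.pyGetD adj i []) k false &&
             PySem.List.pyGetD (PySem.List.pyGetD adj k []) j false &&
             PySem.List.pyGetD (PySem.List.pyGetD adj j []) i false
          then count + 1 else count) count)
      = fun (count j : ℤ) => count +
          ((PySem.List.pyRange (j+1) n 1).map (fun k =>
            (if pvEI adj i j && pvEI adj j k && pvEI adj k i then (1:ℤ) else 0) +
            (if pvEI adj i k && pvEI adj k j && pvEI adj j i then (1:ℤ) else 0))).sum from by
        funext count j
        exact h1 i j count]
    rw [PySem.List.foldl_add]
  rw [show (fun (count i : ℤ) =>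
      (PySem.List.pyRange (i+1) n 1).foldl (fun count j =>
        (PySem.List.pyRange (j+1) n 1).foldl (fun count k =>
          let count := if PySem.List.pyGetD (PySem.List.pyGetD adj i []) j false &&
                          PySem.List.pyGetD (PySem.List.pyGetD adj j []) k false &&
                          PySem.List.pyGetD (PySem.List.pyGetD adj k []) i false
                       then count + 1 else count
          if PySem.List.pyGetD (PySem.List.pyGetD adj i []) k false &&
             PySem.List.pyGetD (PySem.List.pyGetD adj k []) j false &&
             PySem.List.pyGetD (PySem.List.pyGetD adj j []) i false
          then count + 1 else count) count) count)
    = fun (count i : ℤ) => count +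
        ((PySem.List.pyRange (i+1) n 1).map (fun j =>
          ((PySem.List.pyRange (j+1) n 1).map (fun k =>
            (if pvEI adj i j && pvEI adj j k && pvEI adj k i then (1:ℤ) else 0) +
            (if pvEI adj i k && pvEI adj k j && pvEI adj j i then (1:ℤ) else 0))).sum)).sum from by
      funext count i
      exact h2 i count]
  rw [PySem.List.foldl_add, zero_add]

theorem pv_inner (N x : ℕ) (F : ℤ → ℤ) :
    ((PySem.List.pyRange ((x:ℤ)+1) (N:ℤ) 1).map F).sum = ∑ j ∈ Finset.Ico (x+1) N, F (j : ℤ) := by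
  rw [PySem.List.pyRange_one, List.map_map, Function.comp_def, pv_lsum,
    Finset.sum_Ico_eq_sum_range]
  have hM : ((N:ℤ) - ((x:ℤ)+1)).toNat = N - (x+1) := by omega
  rw [hM]
  refine Finset.sum_congr rfl fun t _ => ?_
  push_cast; ring_nf

theorem pv_term (adj : List (List Bool)) (a b c : ℕ) (hab : a ≠ b) (hbc : b ≠ c) (hca : c ≠ a) :
    (if pvEI adj (a:ℤ) (b:ℤ) && pvEI adj (b:ℤ) (c:ℤ) && pvEI adj (c:ℤ) (a:ℤ) then (1:ℤ) else 0)
      = pvG adj a b * pvG adj b c * pvG adj c a := by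
  simp only [pvG, pvE]
  cases h1 : pvEI adj (a:ℤ) (b:ℤ) <;> cases h2 : pvEI adj (b:ℤ) (c:ℤ) <;>
    cases h3 : pvEI adj (c:ℤ) (a:ℤ) <;>
    simp [pvEI] at h1 h2 h3 <;> simp [h1, h2, h3, bne, hab, hbc, hca]

theorem pv_ico (m N : ℕ) (h : ℕ → ℤ) :
    (∑ j ∈ Finset.Ico (m+1) N, h j) = ∑ j ∈ Finset.range N, if m < j then h j else 0 := by
  have he : Finset.Ico (m+1) N = (Finset.range N).filter (fun j => m < j) := by
    ext z; simp; omega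
  rw [he, Finset.sum_filter]

theorem pv_a_eval (adj : List (List Bool)) (N : ℕ) :
    count_directed_3cycles adj (N : Int)
      = ∑ a ∈ Finset.range N, ∑ b ∈ Finset.range N, ∑ c ∈ Finset.range N,
          (if a < b ∧ b < c then
            pvG adj a b * pvG adj b c * pvG adj c a + pvG adj a c * pvG adj c b * pvG adj b a
          else 0) := by
  have hrange : PySem.List.pyRange 0 (N:ℤ) 1 = (List.range N).map (Nat.cast : ℕ → ℤ) := by
    simp [PySem.List.pyRange_one]
  rw [pv_a_sum, hrange, List.map_map, Function.comp_def, pv_lsum]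
  refine Finset.sum_congr rfl fun a ha => ?_
  rw [pv_inner, pv_ico]
  refine Finset.sum_congr rfl fun b hb => ?_
  by_cases hab : a < b
  · rw [if_pos hab]
    rw [pv_inner, pv_ico]
    refine Finset.sum_congr rfl fun c hc => ?_
    by_cases hbc : b < c
    · rw [pv_term adj a b c (by omega) (by omega) (by omega),
        pv_term adj a c b (by omega) (by omega) (by omega),
        if_pos (And.intro hab hbc), if_pos hbc]
    · rw [if_neg hbc, if_neg (by omega)]
  · rw [if_neg hab]
    rw [Finset.sum_eq_zero]
    intro c _
    rw [if_neg (by omega)]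

theorem pv_final (adj : List (List Bool)) (n : Int) :
    count_directed_3cycles adj n = count_directed_3cycles_alt adj n := by
  rcases Int.lt_or_le n 0 with hn | hn
  · have hnil : PySem.List.pyRange 0 n 1 = [] := PySem.List.pyRange_one_eq_nil (by omega)
    unfold count_directed_3cycles count_directed_3cycles_alt
    rw [hnil]
    simp [PySem.Int.floordiv]
  · have hN : ((n.toNat : ℤ)) = n := Int.toNat_of_nonneg hn
    rw [← hN, pv_a_eval, pv_alt_eval,
      pv_key (pvG adj) (fun x => by simp [pvG]) n.toNat,
      PySem.Int.floordiv_eq_ediv_of_pos (by norm_num),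
      Int.mul_ediv_cancel_left _ (by norm_num)]

-- ===== VERDICT (by name: the statement is the Claim_ definition above) =====
theorem count_directed_3cycles_spec : Claim_equal_count_directed_3cycles := by
  intro adj n _ _
  unfold Spec_count_directed_3cycles
  exact pv_final adj n
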